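-- pv_equiv track=rewrite | github.com/Mephisto08/ct-braun-gruppe-vww | main.py | determine_primitive_element
-- ===== SOURCE A (Python) =====
-- def determine_primitive_element(q):
--     gf_target = [x for x in range(1, q)]
--
--     for alpha in range(1, q):
--         gf_without_zero = []
--         for i in range(q-1): # 0 <= i <= q-2
--             gf_without_zero.append((alpha ** i) % q)
--
--         if set(gf_without_zero) == set(gf_target):
--             return alpha
--
--     return None
-- ===== SOURCE B (Python) =====
-- def determine_primitive_element(q):
--     for alpha in range(1, q):
--         seen = set()
--         x = 1
--         for _ in range(q - 1):
--             seen.add(x)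
--             x = x * alpha % q
--         if len(seen) == q - 1 and 0 not in seen:
--             return alpha
--     return None
-- ===== Notes on version B (the rewrite author's own statement) =====
-- stated objective: faster
-- what changed: B replaces A's recomputed big-integer powers alpha**i and set comparison against a prebuilt target list by an incrementally maintained modular power (x = x*alpha % q) collected into a set that is accepted by a cardinality-plus-nonzero test, so no huge integers and no target set are ever built.
import Mathlib
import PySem

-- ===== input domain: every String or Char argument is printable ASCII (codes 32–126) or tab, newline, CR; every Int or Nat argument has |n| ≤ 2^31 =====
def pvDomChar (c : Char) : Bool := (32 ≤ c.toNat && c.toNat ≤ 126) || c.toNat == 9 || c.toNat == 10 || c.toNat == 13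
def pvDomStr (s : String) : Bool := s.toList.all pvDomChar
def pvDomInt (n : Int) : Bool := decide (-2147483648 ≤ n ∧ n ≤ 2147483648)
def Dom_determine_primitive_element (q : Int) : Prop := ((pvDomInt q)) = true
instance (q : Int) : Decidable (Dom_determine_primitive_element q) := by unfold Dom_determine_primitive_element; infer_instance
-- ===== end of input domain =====

-- B maintains each power incrementally mod q and tests the power set by cardinality, instead of
-- recomputing alpha**i as a big integer and comparing sets against a prebuilt target list (faster).


-- ===== PORT A =====
-- the 'for alpha in range(1, q): … return alpha' loop of A
def pvALoop (q : Int) (target : List Int) : List Int → Option Int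
  | [] => none
  | alpha :: rest =>
    let gf_without_zero :=
      (PySem.List.pyRange 0 (q - 1) 1).foldl
        (fun acc i => acc ++ [PySem.Int.mod (alpha ^ i.toNat) q]) []
    if PySem.Set.equal (PySem.Set.ofList gf_without_zero) (PySem.Set.ofList target) then some alpha
    else pvALoop q target rest

def determine_primitive_element (q : Int) : Option Int :=
  let gf_target := PySem.List.pyRange 1 q 1
  pvALoop q gf_target (PySem.List.pyRange 1 q 1)

-- ===== PORT B =====
-- the 'for alpha in range(1, q): … return alpha' loop of B
def pvBLoop (q : Int) : List Int → Option Int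
  | [] => none
  | alpha :: rest =>
    let st :=
      (PySem.List.pyRange 0 (q - 1) 1).foldl
        (fun (st : PySem.Set Int × Int) _ =>
          (PySem.Set.add st.1 st.2, PySem.Int.mod (st.2 * alpha) q))
        (PySem.Set.empty, 1)
    if PySem.Set.len st.1 == q - 1 && !(PySem.Set.contains st.1 0) then some alpha
    else pvBLoop q rest

def determine_primitive_element_alt (q : Int) : Option Int :=
  pvBLoop q (PySem.List.pyRange 1 q 1)

-- ===== PRECONDITION & SPEC =====
def Spec_determine_primitive_element (q : Int) (out : Option Int) : Prop := out = determine_primitive_element_alt q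
instance (q : Int) (out : Option Int) : Decidable (Spec_determine_primitive_element q out) := by unfold Spec_determine_primitive_element; infer_instance

-- ===== CLAIM (what is proved, stated in full; the proofs are below) =====
def Claim_equal_determine_primitive_element : Prop := ∀ (q : Int), Dom_determine_primitive_element q → Spec_determine_primitive_element q (determine_primitive_element q)

-- ===== LEMMAS AND PROOFS =====

-- the trajectory of B's variable x : x, x*alpha%q, …  (n values)
def pvTraj (alpha q : Int) : Nat → Int → List Int
  | 0, _ => []
  | n + 1, x => x :: pvTraj alpha q n (PySem.Int.mod (x * alpha) q)

theorem pvB_fold_fst (alpha q : Int) (l : List Int) :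
    ∀ (s : PySem.Set Int) (x : Int),
      (l.foldl (fun (st : PySem.Set Int × Int) _ =>
          (PySem.Set.add st.1 st.2, PySem.Int.mod (st.2 * alpha) q)) (s, x)).1
        = PySem.Set.update s (pvTraj alpha q l.length x) := by
  induction l with
  | nil => intro s x; simp [pvTraj, PySem.Set.update]
  | cons h t ih =>
    intro s x
    simp only [List.foldl_cons, List.length_cons, pvTraj, PySem.Set.update_cons]
    exact ih (PySem.Set.add s x) (PySem.Int.mod (x * alpha) q)

theorem pvTraj_pow (alpha q : Int) (hq : 1 < q) :
    ∀ (n k : Nat),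
      pvTraj alpha q n (PySem.Int.mod (alpha ^ k) q)
        = (List.range n).map (fun j => PySem.Int.mod (alpha ^ (k + j)) q) := by
  intro n
  induction n with
  | zero => intro k; simp [pvTraj]
  | succ m ih =>
    intro k
    have hstep : PySem.Int.mod (PySem.Int.mod (alpha ^ k) q * alpha) q
        = PySem.Int.mod (alpha ^ (k + 1)) q := by
      rw [PySem.Int.mod_eq_emod_of_pos (show (0:Int) < q by omega),
          PySem.Int.mod_eq_emod_of_pos (show (0:Int) < q by omega),
          PySem.Int.mod_eq_emod_of_pos (show (0:Int) < q by omega)]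
      rw [Int.mul_emod, Int.emod_emod_of_dvd _ (dvd_refl q)]
      rw [← Int.mul_emod, pow_succ]
    rw [pvTraj, hstep, ih (k + 1), List.range_succ_eq_map]
    simp only [List.map_cons, List.map_map]
    refine congrArg₂ List.cons rfl ?_
    apply List.map_congr_left; intro j _
    simp only [Function.comp_apply]; congr 2; omega

theorem pvTraj_one (alpha q : Int) (hq : 1 < q) (n : Nat) :
    pvTraj alpha q n 1 = (List.range n).map (fun j => PySem.Int.mod (alpha ^ j) q) := by
  have h1 : (1 : Int) = PySem.Int.mod (alpha ^ 0) q := by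
    rw [pow_zero, PySem.Int.mod_eq_emod_of_pos (show (0:Int) < q by omega)]
    rw [Int.emod_eq_of_lt (by norm_num) hq]
  rw [h1, pvTraj_pow alpha q hq]
  simp

-- A's inner list is the same list of values
theorem pvA_list (alpha q : Int) :
    (PySem.List.pyRange 0 (q - 1) 1).foldl
        (fun acc i => acc ++ [PySem.Int.mod (alpha ^ i.toNat) q]) []
      = (List.range (q - 1).toNat).map (fun j => PySem.Int.mod (alpha ^ j) q) := by
  rw [PySem.List.foldl_append_singleton_eq_map, PySem.List.pyRange_one, List.map_map]
  simp

-- per-candidate: A's acceptance test equals B's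
theorem pvCond_eq (alpha q : Int) (hq : 1 < q) :
    PySem.Set.equal
        (PySem.Set.ofList ((List.range (q - 1).toNat).map (fun j => PySem.Int.mod (alpha ^ j) q)))
        (PySem.Set.ofList (PySem.List.pyRange 1 q 1))
      = (PySem.Set.len (PySem.Set.ofList ((List.range (q - 1).toNat).map (fun j => PySem.Int.mod (alpha ^ j) q))) == q - 1
          && !(PySem.Set.contains (PySem.Set.ofList ((List.range (q - 1).toNat).map (fun j => PySem.Int.mod (alpha ^ j) q))) 0)) := by
  set P : List Int := (List.range (q - 1).toNat).map (fun j => PySem.Int.mod (alpha ^ j) q) with hP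
  have hq0 : (0 : Int) < q := by omega
  have hPmem : ∀ p ∈ P, 0 ≤ p ∧ p < q := by
    intro p hp
    rw [hP] at hp
    simp only [List.mem_map] at hp
    obtain ⟨j, _, rfl⟩ := hp
    exact ⟨PySem.Int.mod_nonneg _ hq0, PySem.Int.mod_lt _ hq0⟩
  have hT : PySem.Set.ofList (PySem.List.pyRange 1 q 1) = PySem.List.pyRange 1 q 1 :=
    PySem.Set.ofList_eq_self_of_nodup _ (PySem.List.nodup_pyRange_one 1 q)
  have hlenT : (PySem.List.pyRange 1 q 1).length = (q - 1).toNat := by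
    rw [PySem.List.length_pyRange_one]
  rw [hT]
  rw [Bool.eq_iff_iff]
  constructor
  · intro h
    have hmem := (PySem.Set.equal_iff _ _).mp h
    have hperm : (PySem.Set.ofList P).Perm (PySem.List.pyRange 1 q 1) :=
      (List.perm_ext_iff_of_nodup (PySem.Set.nodup_ofList _) (PySem.List.nodup_pyRange_one 1 q)).mpr hmem
    have hlen : (PySem.Set.ofList P).length = (q - 1).toNat := by
      rw [hperm.length_eq, hlenT]
    have h0 : ¬ (0 : Int) ∈ PySem.Set.ofList P := by
      intro h0
      have := (hmem 0).mp h0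
      rw [PySem.List.mem_pyRange_one] at this
      omega
    simp only [Bool.and_eq_true, beq_iff_eq, Bool.not_eq_true']
    constructor
    · show PySem.Set.len (PySem.Set.ofList P) = q - 1
      simp only [PySem.Set.len, hlen]
      omega
    · rw [← Bool.not_eq_true, PySem.Set.contains_iff]
      exact h0
  · intro h
    simp only [Bool.and_eq_true, beq_iff_eq, Bool.not_eq_true'] at h
    obtain ⟨hlen, h0⟩ := h
    have h0' : ¬ (0 : Int) ∈ PySem.Set.ofList P := by
      rw [← PySem.Set.contains_iff, h0]; simp
    have hsub : (PySem.Set.ofList P) ⊆ PySem.List.pyRange 1 q 1 := by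
      intro x hx
      have hx' : x ∈ P := (PySem.Set.mem_ofList _ _).mp hx
      have := hPmem x hx'
      rw [PySem.List.mem_pyRange_one]
      have hxne : x ≠ 0 := by intro hxe; exact h0' (hxe ▸ hx)
      omega
    have hlen' : (PySem.Set.ofList P).length = (q - 1).toNat := by
      simp only [PySem.Set.len] at hlen
      omega
    have hsp : (PySem.Set.ofList P).Subperm (PySem.List.pyRange 1 q 1) :=
      (List.subperm_ext_iff).mpr (fun a ha => by
        have h1 : (PySem.Set.ofList P).count a = 1 :=
          List.count_eq_one_of_mem (PySem.Set.nodup_ofList P) ha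
        have h2 : 0 < (PySem.List.pyRange 1 q 1).count a :=
          List.count_pos_iff.mpr (hsub ha)
        omega)
    have hperm : (PySem.Set.ofList P).Perm (PySem.List.pyRange 1 q 1) := by
      apply hsp.perm_of_length_le
      rw [hlen', hlenT]
    rw [PySem.Set.equal_iff]
    intro x
    exact ⟨fun hx => hperm.mem_iff.mp hx, fun hx => hperm.mem_iff.mpr hx⟩

theorem pvLoop_congr (q : Int) (hq : 1 < q) :
    ∀ (l : List Int),
      pvALoop q (PySem.List.pyRange 1 q 1) l = pvBLoop q l := by
  intro l
  induction l with
  | nil => rfl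
  | cons alpha rest ih =>
    show (if _ then some alpha else pvALoop q _ rest) = (if _ then some alpha else pvBLoop q rest)
    rw [pvA_list, pvB_fold_fst, PySem.List.length_pyRange_one,
        show q - 1 - 0 = q - 1 by ring, PySem.Set.update_empty, pvTraj_one alpha q hq,
        pvCond_eq alpha q hq, ih]

-- ===== VERDICT (by name: the statement is the Claim_ definition above) =====
theorem determine_primitive_element_spec : Claim_equal_determine_primitive_element := by
  intro q _
  show determine_primitive_element q = determine_primitive_element_alt q
  by_cases hq : 1 < q
  · exact pvLoop_congr q hq _
  · have : PySem.List.pyRange 1 q 1 = [] := PySem.List.pyRange_one_eq_nil (by omega)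
    simp [determine_primitive_element, determine_primitive_element_alt, this, pvALoop, pvBLoop]
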